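-- pv_equiv track=rewrite | github.com/opussf/ProgChallenges | number_persistance/persistance.py | per_iterative
-- ===== SOURCE A (Python) =====
-- def per_iterative( n ):
-- 	steps = 0
-- 	nums = []
-- 	while len( str( n ) ) > 1:
-- 		steps += 1
-- 		nums.append( n )
-- 		result = 1
-- 		for j in [ int( i ) for i in str( n ) ]:
-- 			result *= j
-- 		n = result
-- 	return steps, nums
-- ===== SOURCE B (Python) =====
-- def per_iterative(n):
--     if len(str(n)) <= 1:
--         return 0, []
--     p = 1
--     for d in str(n):
--         p *= int(d)
--     steps, rest = per_iterative(p)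
--     return steps + 1, [n] + rest
-- ===== Notes on version B (the rewrite author's own statement) =====
-- stated objective: alternative
-- what changed: Replaces the while-loop that threads (steps, nums) accumulators with direct recursion on the persistence recurrence, prepending the current value to the recursive result.
import Mathlib
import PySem

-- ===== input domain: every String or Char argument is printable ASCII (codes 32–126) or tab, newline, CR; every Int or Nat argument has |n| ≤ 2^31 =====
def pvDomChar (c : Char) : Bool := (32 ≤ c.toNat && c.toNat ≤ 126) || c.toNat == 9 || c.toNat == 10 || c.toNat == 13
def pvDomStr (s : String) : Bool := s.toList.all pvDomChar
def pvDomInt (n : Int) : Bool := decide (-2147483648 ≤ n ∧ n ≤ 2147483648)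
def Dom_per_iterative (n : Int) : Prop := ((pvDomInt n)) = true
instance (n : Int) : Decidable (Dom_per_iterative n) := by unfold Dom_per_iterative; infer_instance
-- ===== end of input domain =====

-- B replaces A's while-loop with explicit (steps, nums) accumulators by direct recursion on the
-- persistence recurrence, prepending the current value; same cost (objective: alternative).

-- ===== PORT A =====
-- digit product: result = 1; for j in [int(i) for i in str(n)]: result *= j
-- (int(i) on a single char of str(n); getD 0 is never reached for n ≥ 0, and for n < 0 Python raises, excluded by Pre_)
def pvDigitProd (n : Int) : Int :=
  (((PySem.Int.toChars n).map (fun c => (PySem.Int.ofChars? [c]).getD 0)).foldl (· * ·) 1)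

-- A's while loop, fuel-bounded for totality (fuel n.toNat + 1 always suffices: the digit product
-- of an n with several digits is smaller than n)
def pvLoopA (fuel : Nat) (steps : Int) (nums : List Int) (n : Int) : Int × List Int :=
  match fuel with
  | 0 => (steps, nums)
  | fuel + 1 =>
    if 1 < (PySem.Int.toChars n).length then
      pvLoopA fuel (steps + 1) (nums ++ [n]) (pvDigitProd n)
    else (steps, nums)

def per_iterative (n : Int) : Int × List Int :=
  pvLoopA (n.toNat + 1) 0 [] n

-- ===== PORT B =====
-- B's recursion, fuel-bounded for totality with the same fuel
def pvRecB (fuel : Nat) (n : Int) : Int × List Int :=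
  match fuel with
  | 0 => (0, [])
  | fuel + 1 =>
    if (PySem.Int.toChars n).length ≤ 1 then (0, [])
    else
      let p := pvDigitProd n
      let r := pvRecB fuel p
      (r.1 + 1, n :: r.2)

def per_iterative_alt (n : Int) : Int × List Int :=
  pvRecB (n.toNat + 1) n

-- ===== PRECONDITION & SPEC =====
-- Pre_ excludes negative n, where both Pythons raise ValueError (int('-') on the sign character)
def Pre_per_iterative (n : Int) : Prop := 0 ≤ n
instance (n : Int) : Decidable (Pre_per_iterative n) := by unfold Pre_per_iterative; infer_instance
def pvWitness_per_iterative : Int := 39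

def Spec_per_iterative (n : Int) (out : Int × List Int) : Prop := out = per_iterative_alt n
instance (n : Int) (out : Int × List Int) : Decidable (Spec_per_iterative n out) := by unfold Spec_per_iterative; infer_instance

-- ===== CLAIM (what is proved, stated in full; the proofs are below) =====
def Claim_equal_per_iterative : Prop := ∀ (n : Int), Dom_per_iterative n → Pre_per_iterative n → Spec_per_iterative n (per_iterative n)

-- ===== LEMMAS AND PROOFS =====
lemma pvLoopA_eq_recB (fuel : Nat) : ∀ (steps : Int) (nums : List Int) (n : Int),
    pvLoopA fuel steps nums n = (steps + (pvRecB fuel n).1, nums ++ (pvRecB fuel n).2) := by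
  induction fuel with
  | zero => intro steps nums n; simp [pvLoopA, pvRecB]
  | succ f ih =>
    intro steps nums n
    by_cases h : 1 < (PySem.Int.toChars n).length
    · have h' : ¬ (PySem.Int.toChars n).length ≤ 1 := by omega
      simp only [pvLoopA, pvRecB, if_pos h, if_neg h', ih]
      refine Prod.ext ?_ ?_
      · simp; ring
      · simp
    · have h' : (PySem.Int.toChars n).length ≤ 1 := by omega
      simp [pvLoopA, pvRecB, if_neg h, if_pos h']

-- ===== VERDICT (by name: the statement is the Claim_ definition above) =====
theorem per_iterative_spec : Claim_equal_per_iterative := by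
  intro n _ _
  unfold Spec_per_iterative per_iterative per_iterative_alt
  simp [pvLoopA_eq_recB]
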